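-- pv_equiv track=rewrite | github.com/Nikhil-Mundhra/Naturo | Legacy/Product Search Old/main.py | matches_size
-- ===== SOURCE A (Python) =====
-- def matches_size(searchable, required_sizes):
--     for sz in required_sizes:
--         v1 = sz.lower()
--         v2 = v1.replace('_', '')
--         v3 = v1.rstrip('f').rstrip('l')
--         for v in (v1, v2, v3):
--             if v and v in searchable:
--                 return True
--     return False
-- ===== SOURCE B (Python) =====
-- def matches_size(searchable, required_sizes):
--     variants = tuple(
--         v
--         for sz in required_sizes
--         for v1 in (sz.lower(),)
--         for v in (v1, v1.replace('_', ''), v1.rstrip('f').rstrip('l'))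
--         if v
--     )
--     # single left-to-right scan of searchable: at each position, does any variant start here?
--     return any(searchable.startswith(variants, i) for i in range(len(searchable) + 1))
-- ===== Notes on version B (the rewrite author's own statement) =====
-- stated objective: alternative
-- what changed: Instead of scanning searchable once per variant inside a nested per-size loop, B first builds the flat tuple of all non-empty normalized variants and then makes a single left-to-right pass over searchable, testing startswith(variants, i) at each position.
import Mathlib
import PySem

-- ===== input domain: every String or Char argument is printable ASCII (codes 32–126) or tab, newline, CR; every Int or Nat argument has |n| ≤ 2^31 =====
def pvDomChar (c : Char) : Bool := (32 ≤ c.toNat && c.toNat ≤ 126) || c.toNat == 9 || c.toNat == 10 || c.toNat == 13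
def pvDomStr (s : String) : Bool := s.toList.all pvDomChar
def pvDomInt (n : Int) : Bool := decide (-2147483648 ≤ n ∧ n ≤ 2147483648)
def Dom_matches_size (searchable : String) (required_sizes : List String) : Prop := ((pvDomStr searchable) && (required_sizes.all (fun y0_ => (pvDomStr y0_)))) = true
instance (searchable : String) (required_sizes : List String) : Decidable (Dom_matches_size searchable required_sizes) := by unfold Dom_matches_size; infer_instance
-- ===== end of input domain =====

-- B replaces A's per-size nested substring scans by building the flat list of non-empty
-- normalized variants once and making a single left-to-right positional pass over searchable
-- (objective: alternative decomposition, same asymptotic cost).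

-- hand port of Python's str.rstrip(c) for a single character c: drop all trailing copies of c; exact.
def pvRstrip (cs : List Char) (c : Char) : List Char :=
  (cs.reverse.dropWhile (fun x => x == c)).reverse

-- ===== PORT A =====
def matches_size (searchable : String) (required_sizes : List String) : Bool :=
  match required_sizes with
  | [] => false
  | sz :: rest =>
    let v1 := PySem.Chars.lower sz.toList
    let v2 := PySem.Chars.replace v1 ['_'] []
    let v3 := pvRstrip (pvRstrip v1 'f') 'l'
    if [v1, v2, v3].any (fun v => !v.isEmpty && PySem.Chars.isIn v searchable.toList) then
      true
    else
      matches_size searchable rest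

-- ===== PORT B =====
def matches_size_alt (searchable : String) (required_sizes : List String) : Bool :=
  -- the flat comprehension: all non-empty variants of all sizes, in order
  let variants := required_sizes.flatMap (fun sz =>
    let v1 := PySem.Chars.lower sz.toList
    ([v1, PySem.Chars.replace v1 ['_'] [], pvRstrip (pvRstrip v1 'f') 'l']).filter
      (fun v => !v.isEmpty))
  -- searchable.startswith(variants, i) (tuple startswith at position 0 ≤ i ≤ len): hand port, exact on this range
  (List.range (searchable.toList.length + 1)).any (fun i =>
    variants.any (fun v => PySem.Chars.startswith (searchable.toList.drop i) v))

-- ===== PRECONDITION & SPEC =====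
def Spec_matches_size (searchable : String) (required_sizes : List String) (out : Bool) : Prop := out = matches_size_alt searchable required_sizes
instance (searchable : String) (required_sizes : List String) (out : Bool) : Decidable (Spec_matches_size searchable required_sizes out) := by unfold Spec_matches_size; infer_instance

-- ===== CLAIM (what is proved, stated in full; the proofs are below) =====
def Claim_equal_matches_size : Prop := ∀ (searchable : String) (required_sizes : List String), Dom_matches_size searchable required_sizes → Spec_matches_size searchable required_sizes (matches_size searchable required_sizes)

-- ===== LEMMAS AND PROOFS =====

-- a word is an infix of s iff it is a prefix of some drop i with i ≤ |s|
theorem pv_bridge (s v : List Char) :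
    (∃ i ∈ List.range (s.length + 1), v <+: s.drop i) ↔ v <:+: s := by
  constructor
  · rintro ⟨i, -, hp⟩
    exact hp.isInfix.trans (s.drop_suffix i).isInfix
  · rintro ⟨t, u, h⟩
    refine ⟨t.length, ?_, ?_⟩
    · have : t.length ≤ s.length := by
        rw [← h]; simp
      simp [List.mem_range]; omega
    · rw [← h, List.append_assoc, List.drop_left]
      exact List.prefix_append v u

theorem pv_A_iff (searchable : String) (rs : List String) :
    matches_size searchable rs = true ↔
      ∃ sz ∈ rs,
        ∃ v ∈ [PySem.Chars.lower sz.toList,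
               PySem.Chars.replace (PySem.Chars.lower sz.toList) ['_'] [],
               pvRstrip (pvRstrip (PySem.Chars.lower sz.toList) 'f') 'l'],
          v.isEmpty = false ∧ PySem.Chars.isIn v searchable.toList = true := by
  induction rs with
  | nil => simp [matches_size]
  | cons sz rest ih =>
    simp only [matches_size]
    by_cases h : ([PySem.Chars.lower sz.toList,
        PySem.Chars.replace (PySem.Chars.lower sz.toList) ['_'] [],
        pvRstrip (pvRstrip (PySem.Chars.lower sz.toList) 'f') 'l']).any
          (fun v => !v.isEmpty && PySem.Chars.isIn v searchable.toList) = true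
    · rw [if_pos h]
      simp only [true_iff]
      rcases List.any_eq_true.mp h with ⟨v, hv, hp⟩
      simp only [Bool.and_eq_true, Bool.not_eq_true'] at hp
      exact ⟨sz, by simp, v, hv, hp⟩
    · rw [if_neg h, ih]
      constructor
      · rintro ⟨z, hz, v, hv, hp⟩; exact ⟨z, by simp [hz], v, hv, hp⟩
      · rintro ⟨z, hz, v, hv, hp⟩
        rcases List.mem_cons.mp hz with rfl | hz'
        · exact absurd (List.any_eq_true.mpr ⟨v, hv, by
            simp only [Bool.and_eq_true, Bool.not_eq_true']; exact hp⟩) h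
        · exact ⟨z, hz', v, hv, hp⟩

theorem pv_B_iff (searchable : String) (rs : List String) :
    matches_size_alt searchable rs = true ↔
      ∃ i ∈ List.range (searchable.toList.length + 1),
        ∃ sz ∈ rs,
          ∃ v ∈ [PySem.Chars.lower sz.toList,
                 PySem.Chars.replace (PySem.Chars.lower sz.toList) ['_'] [],
                 pvRstrip (pvRstrip (PySem.Chars.lower sz.toList) 'f') 'l'],
            v.isEmpty = false ∧ v <+: searchable.toList.drop i := by
  simp only [matches_size_alt, List.any_eq_true, List.mem_flatMap, List.mem_filter,
    PySem.Chars.startswith_iff, Bool.not_eq_true']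
  tauto

theorem pv_main (searchable : String) (rs : List String) :
    matches_size searchable rs = matches_size_alt searchable rs := by
  rw [Bool.eq_iff_iff, pv_A_iff, pv_B_iff]
  constructor
  · rintro ⟨sz, hsz, v, hv, hne, hin⟩
    rcases (pv_bridge searchable.toList v).mpr
      ((PySem.Chars.isIn_iff_infix v searchable.toList).mp hin) with ⟨i, hi, hpre⟩
    exact ⟨i, hi, sz, hsz, v, hv, hne, hpre⟩
  · rintro ⟨i, hi, sz, hsz, v, hv, hne, hpre⟩
    exact ⟨sz, hsz, v, hv, hne,
      (PySem.Chars.isIn_iff_infix v searchable.toList).mpr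
        ((pv_bridge searchable.toList v).mp ⟨i, hi, hpre⟩)⟩

-- ===== VERDICT (by name: the statement is the Claim_ definition above) =====
theorem matches_size_spec : Claim_equal_matches_size := by
  intro searchable rs _
  exact pv_main searchable rs
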